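-- pv_equiv track=rewrite | github.com/perlygatekeeper/glowing-robot | google_test/free_the_bunny_prisoners/solution_from_net.py | solution
-- ===== SOURCE A (Python) =====
-- from itertools import combinations
--
-- def solution(num_buns, num_required):
--     keyrings = [[] for num in range(num_buns)]
--     copies_per_key = num_buns - num_required + 1
--     if copies_per_key < 0:
--         return [[]]
--     for key, bunnies in enumerate(combinations(range(num_buns), copies_per_key)):
--         for bunny in bunnies:
--             keyrings[bunny].append(key)
--     return keyrings
-- ===== SOURCE B (Python) =====
-- from itertools import combinations
--
-- def solution(num_buns, num_required):
--     copies_per_key = num_buns - num_required + 1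
--     if copies_per_key < 0:
--         return [[]]
--     combos = list(combinations(range(num_buns), copies_per_key))
--     return [[key for key, combo in enumerate(combos) if bunny in combo]
--             for bunny in range(num_buns)]
-- ===== Notes on version B (the rewrite author's own statement) =====
-- stated objective: idiomatic
-- what changed: Scatter replaced by gather/transpose: instead of mutating per-bunny keyrings while iterating combinations, B materializes the combinations once and builds each bunny's keyring by a comprehension selecting the keys whose combination contains that bunny.
import Mathlib
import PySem

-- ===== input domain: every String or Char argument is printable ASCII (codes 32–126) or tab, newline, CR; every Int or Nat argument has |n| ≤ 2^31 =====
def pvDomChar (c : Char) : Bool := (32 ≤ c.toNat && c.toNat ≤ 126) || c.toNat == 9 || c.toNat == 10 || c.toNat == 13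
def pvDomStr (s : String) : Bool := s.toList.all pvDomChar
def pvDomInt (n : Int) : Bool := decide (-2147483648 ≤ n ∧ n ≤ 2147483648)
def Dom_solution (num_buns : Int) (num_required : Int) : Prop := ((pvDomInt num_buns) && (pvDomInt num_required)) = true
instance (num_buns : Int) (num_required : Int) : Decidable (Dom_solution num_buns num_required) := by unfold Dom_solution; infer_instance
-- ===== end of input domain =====

-- B replaces A's scatter (mutating per-bunny keyrings while iterating combinations) by a
-- gather/transpose over the same materialized combination list (objective: idiomatic).

-- itertools.combinations(l, k) in lexicographic order of positions (shared by both Pythons)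
def pvCombos : List Int → Nat → List (List Int)
  | _, 0 => [[]]
  | [], _ + 1 => []
  | x :: xs, k + 1 =>
    -- itertools short-circuits when r > n (returns no combinations); kept for the same reason
    if xs.length + 1 < k + 1 then []
    else (pvCombos xs k).map (fun c => x :: c) ++ pvCombos xs (k + 1)

-- ===== PORT A =====
def solution (num_buns : Int) (num_required : Int) : List (List Int) :=
  let keyrings := (PySem.List.pyRange 0 num_buns 1).map (fun _ => ([] : List Int))
  let copies_per_key := num_buns - num_required + 1
  if copies_per_key < 0 then [[]]
  else
    (PySem.List.enumerate (pvCombos (PySem.List.pyRange 0 num_buns 1) copies_per_key.toNat) 0).foldl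
      (fun rs kb => kb.2.foldl (fun rs b => rs.modify b.toNat (fun r => r ++ [kb.1])) rs)
      keyrings

-- ===== PORT B =====
def solution_alt (num_buns : Int) (num_required : Int) : List (List Int) :=
  let copies_per_key := num_buns - num_required + 1
  if copies_per_key < 0 then [[]]
  else
    let combos := pvCombos (PySem.List.pyRange 0 num_buns 1) copies_per_key.toNat
    (PySem.List.pyRange 0 num_buns 1).map (fun bunny =>
      (PySem.List.enumerate combos 0).filterMap
        (fun kc => if bunny ∈ kc.2 then some kc.1 else none))

-- ===== PRECONDITION & SPEC =====
def Spec_solution (num_buns : Int) (num_required : Int) (out : List (List Int)) : Prop := out = solution_alt num_buns num_required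
instance (num_buns : Int) (num_required : Int) (out : List (List Int)) : Decidable (Spec_solution num_buns num_required out) := by unfold Spec_solution; infer_instance

-- ===== CLAIM (what is proved, stated in full; the proofs are below) =====
def Claim_equal_solution : Prop := ∀ (num_buns : Int) (num_required : Int), Dom_solution num_buns num_required → Spec_solution num_buns num_required (solution num_buns num_required)

-- ===== LEMMAS AND PROOFS =====

lemma pvCombos_subset : ∀ (l : List Int) (k : Nat), ∀ c ∈ pvCombos l k, c ⊆ l := by
  intro l
  induction l with
  | nil =>
    intro k c hc
    cases k with
    | zero => simp [pvCombos] at hc; simp [hc]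
    | succ k => simp [pvCombos] at hc
  | cons x xs ih =>
    intro k c hc
    cases k with
    | zero => simp [pvCombos] at hc; simp [hc]
    | succ k =>
      simp only [pvCombos] at hc
      split at hc
      · simp at hc
      · simp only [List.mem_append, List.mem_map] at hc
        rcases hc with ⟨c', hc', rfl⟩ | hc
        · exact List.cons_subset_cons x (ih k c' hc')
        · exact List.subset_cons_of_subset x (ih (k + 1) c hc)

lemma pvCombos_nodup : ∀ (l : List Int), l.Nodup → ∀ (k : Nat), ∀ c ∈ pvCombos l k, c.Nodup := by
  intro l
  induction l with
  | nil =>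
    intro _ k c hc
    cases k with
    | zero => simp [pvCombos] at hc; simp [hc]
    | succ k => simp [pvCombos] at hc
  | cons x xs ih =>
    intro hnd k c hc
    rw [List.nodup_cons] at hnd
    cases k with
    | zero => simp [pvCombos] at hc; simp [hc]
    | succ k =>
      simp only [pvCombos] at hc
      split at hc
      · simp at hc
      · simp only [List.mem_append, List.mem_map] at hc
        rcases hc with ⟨c', hc', rfl⟩ | hc
        · exact List.nodup_cons.2 ⟨fun hx => hnd.1 (pvCombos_subset xs k c' hc' hx), ih hnd.2 k c' hc'⟩
        · exact ih hnd.2 (k + 1) c hc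

lemma scatterOne_length : ∀ (bs : List Int) (key : Int) (rs : List (List Int)),
    (bs.foldl (fun rs b => rs.modify b.toNat (fun r => r ++ [key])) rs).length = rs.length := by
  intro bs
  induction bs with
  | nil => intro key rs; rfl
  | cons x xs ih => intro key rs; simp [List.foldl_cons, ih]

lemma scatterOne_get : ∀ (bs : List Int) (key : Int) (rs : List (List Int)) (b : Nat)
    (hb : b < rs.length), (∀ x ∈ bs, 0 ≤ x) → bs.Nodup →
    (bs.foldl (fun rs b => rs.modify b.toNat (fun r => r ++ [key])) rs)[b]? =
      some (rs[b] ++ if (b : Int) ∈ bs then [key] else []) := by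
  intro bs
  induction bs with
  | nil => intro key rs b hb _ _; simp
  | cons x xs ih =>
    intro key rs b hb hnn hnd
    rw [List.nodup_cons] at hnd
    have hx0 : 0 ≤ x := hnn x (List.mem_cons_self ..)
    rw [List.foldl_cons]
    have hb' : b < (rs.modify x.toNat (fun r => r ++ [key])).length := by
      simpa using hb
    rw [ih key _ b hb' (fun y hy => hnn y (List.mem_cons_of_mem _ hy)) hnd.2]
    by_cases hxb : x = (b : Int)
    · have hxt : x.toNat = b := by omega
      have hbx : (b : Int) ∉ xs := by rw [← hxb]; exact hnd.1
      simp [hxb, hbx]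
    · have hxt : x.toNat ≠ b := by omega
      simp [List.mem_cons, Ne.symm hxb, hxt]

lemma scatter_get : ∀ (cs : List (List Int)) (s : Int) (rs : List (List Int)) (b : Nat)
    (hb : b < rs.length), (∀ c ∈ cs, ∀ x ∈ c, 0 ≤ x) → (∀ c ∈ cs, c.Nodup) →
    ((PySem.List.enumerate cs s).foldl
        (fun rs kb => kb.2.foldl (fun rs b => rs.modify b.toNat (fun r => r ++ [kb.1])) rs) rs)[b]? =
      some (rs[b] ++ (PySem.List.enumerate cs s).filterMap
        (fun kc => if (b : Int) ∈ kc.2 then some kc.1 else none)) := by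
  intro cs
  induction cs with
  | nil => intro s rs b hb _ _; simp [PySem.List.enumerate_nil]
  | cons c cs ih =>
    intro s rs b hb hnn hnd
    rw [PySem.List.enumerate_cons, List.foldl_cons, List.filterMap_cons]
    have hc0 : ∀ x ∈ c, 0 ≤ x := hnn c (List.mem_cons_self ..)
    have hcN : c.Nodup := hnd c (List.mem_cons_self ..)
    have hb' : b < (c.foldl (fun rs b => rs.modify b.toNat (fun r => r ++ [s])) rs).length := by
      rw [scatterOne_length]; exact hb
    rw [ih (s + 1) _ b hb' (fun d hd => hnn d (List.mem_cons_of_mem _ hd))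
        (fun d hd => hnd d (List.mem_cons_of_mem _ hd))]
    have hget := scatterOne_get c s rs b hb hc0 hcN
    have hgetv : (c.foldl (fun rs b => rs.modify b.toNat (fun r => r ++ [s])) rs)[b] =
        rs[b] ++ if (b : Int) ∈ c then [s] else [] := by
      have := List.getElem?_eq_getElem hb'
      rw [this] at hget
      exact Option.some.inj hget
    rw [hgetv]
    by_cases hmem : (b : Int) ∈ c <;> simp [hmem]

lemma scatter_length : ∀ (es : List (Int × List Int)) (rs : List (List Int)),
    (es.foldl (fun rs kb => kb.2.foldl (fun rs b => rs.modify b.toNat (fun r => r ++ [kb.1])) rs)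
        rs).length = rs.length := by
  intro es
  induction es with
  | nil => intro rs; rfl
  | cons e es ih => intro rs; rw [List.foldl_cons, ih, scatterOne_length]

-- ===== VERDICT (by name: the statement is the Claim_ definition above) =====
theorem solution_spec : Claim_equal_solution := by
  intro nb nr _
  show solution nb nr = solution_alt nb nr
  by_cases h : nb - nr + 1 < 0
  · simp [solution, solution_alt, h]
  · have hnn : ∀ c ∈ pvCombos (PySem.List.pyRange 0 nb 1) (nb - nr + 1).toNat,
        ∀ x ∈ c, 0 ≤ x := by
      intro c hc x hx
      exact (PySem.List.mem_pyRange_one.1 (pvCombos_subset _ _ c hc hx)).1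
    have hnd : ∀ c ∈ pvCombos (PySem.List.pyRange 0 nb 1) (nb - nr + 1).toNat, c.Nodup :=
      pvCombos_nodup _ (PySem.List.nodup_pyRange_one ..) _
    simp only [solution, solution_alt, if_neg h]
    apply List.ext_getElem?
    intro i
    by_cases hi : i < (PySem.List.pyRange 0 nb 1).length
    · have hb : i < ((PySem.List.pyRange 0 nb 1).map (fun _ => ([] : List Int))).length := by
        simpa using hi
      rw [scatter_get _ 0 _ i hb hnn hnd]
      rw [List.getElem?_map, List.getElem?_eq_getElem hi]
      simp [PySem.List.getElem_pyRange_one]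
    · rw [List.getElem?_eq_none, List.getElem?_eq_none]
      · simpa using hi
      · rw [scatter_length]; simpa using hi
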